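-- pv_equiv track=rewrite | github.com/Apollo1840/toy_projects | factorial.py | calc_answer_core
-- ===== SOURCE A (Python) =====
-- def calc_answer_core(list_n, i, p):
--     if list_n[i] > p:
--         return 0
--
--     if list_n[i] == 1:
--         return 1
--
--     if list_n[i] == 2:
--         return 2 % p
--
--     res = 1
--     while res < p and i < len(list_n):
--         res *= list_n[i]
--         i += 1
--
--     left = res % p
--
--     if i < len(list_n):
--         right = calc_answer_core(list_n, i, p)
--     else:
--         right = 1
--
--     return (left * right) % p
-- ===== SOURCE B (Python) =====
-- def calc_answer_core(list_n, i, p):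
--     x = list_n[i]
--     if x > p:
--         return 0
--     if x == 1:
--         return 1
--     if x == 2:
--         return 2 % p
--     n = len(list_n)
--     acc = 1
--     while i < n:
--         res = 1
--         while res < p:
--             if i >= n:
--                 break
--             res *= list_n[i]
--             i += 1
--         acc = acc * res % p
--         if i >= n:
--             break
--         x = list_n[i]
--         if x > p:
--             return 0
--         if x == 1:
--             return acc
--         if x == 2:
--             return acc * 2 % p
--     return acc
-- ===== Notes on version B (the rewrite author's own statement) =====
-- stated objective: simpler
-- what changed: A's self-recursion (each batch recurses on the rest of the list and folds nested mods on the way back out) is rewritten as a single iterative loop carrying a running accumulator acc = acc * res % p, with the batch-boundary guards returning directly from the loop.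
import Mathlib
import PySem

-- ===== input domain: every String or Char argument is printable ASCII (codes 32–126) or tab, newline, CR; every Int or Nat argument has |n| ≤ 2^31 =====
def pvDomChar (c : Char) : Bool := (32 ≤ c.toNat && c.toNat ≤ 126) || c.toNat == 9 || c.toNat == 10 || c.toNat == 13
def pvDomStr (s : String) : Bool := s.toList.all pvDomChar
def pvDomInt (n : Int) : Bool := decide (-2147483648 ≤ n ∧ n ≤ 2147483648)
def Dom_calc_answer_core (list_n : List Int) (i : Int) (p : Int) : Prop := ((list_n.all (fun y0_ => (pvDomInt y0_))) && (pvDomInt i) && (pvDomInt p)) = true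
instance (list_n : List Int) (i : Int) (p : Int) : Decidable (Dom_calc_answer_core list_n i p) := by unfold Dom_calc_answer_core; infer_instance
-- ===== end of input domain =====

-- B rewrites A's recursion as a single accumulator loop (objective: simpler, iterative); equivalence is proved on Pre_ below.

-- list_n[j] as both Pythons use it (negative index from the end); out-of-range (IndexError) is outside Pre_
def pvIdx (list_n : List Int) (j : Int) : Int := (PySem.List.pyGet? list_n j).getD 0

-- ===== PORT A =====
-- A's inner while loop: while res < p and i < len(list_n): res *= list_n[i]; i += 1
def pvALoop (list_n : List Int) (p res i : Int) : Int × Int :=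
  if h : res < p ∧ i < (list_n.length : Int) then
    pvALoop list_n p (res * pvIdx list_n i) (i + 1)
  else (res, i)
termination_by ((list_n.length : Int) - i).toNat
decreasing_by omega

-- A's recursion, with fuel only to make it total in Lean (the Python recursion depth is ≤ len - i on Pre_; fuel never runs out there)
def pvACore (list_n : List Int) (p : Int) : Nat → Int → Int
  | 0, _ => 0
  | fuel + 1, i =>
    let x := pvIdx list_n i
    if x > p then 0
    else if x = 1 then 1
    else if x = 2 then PySem.Int.mod 2 p
    else
      let s := pvALoop list_n p 1 i
      let left := PySem.Int.mod s.1 p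
      let right := if s.2 < (list_n.length : Int) then pvACore list_n p fuel s.2 else 1
      PySem.Int.mod (left * right) p

def calc_answer_core (list_n : List Int) (i : Int) (p : Int) : Int :=
  pvACore list_n p (2 * list_n.length + 2) i

-- ===== PORT B =====
-- B's inner batching loop: while res < p: if i >= n: break; res *= list_n[i]; i += 1
def pvBInner (list_n : List Int) (p res i : Int) : Int × Int :=
  if res < p then
    if (list_n.length : Int) ≤ i then (res, i)
    else pvBInner list_n p (res * pvIdx list_n i) (i + 1)
  else (res, i)
termination_by ((list_n.length : Int) - i).toNat
decreasing_by omega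

-- B's outer accumulator loop; fuel only makes it total in Lean (inside Pre_ each pass advances i, so fuel never runs out)
def pvBOuter (list_n : List Int) (p : Int) : Nat → Int → Int → Int
  | 0, acc, _ => acc
  | fuel + 1, acc, i =>
    if i < (list_n.length : Int) then
      let s := pvBInner list_n p 1 i
      let acc' := PySem.Int.mod (acc * s.1) p
      if (list_n.length : Int) ≤ s.2 then acc'
      else
        let x := pvIdx list_n s.2
        if x > p then 0
        else if x = 1 then acc'
        else if x = 2 then PySem.Int.mod (acc' * 2) p
        else pvBOuter list_n p fuel acc' s.2
    else acc

def calc_answer_core_alt (list_n : List Int) (i : Int) (p : Int) : Int :=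
  let x := pvIdx list_n i
  if x > p then 0
  else if x = 1 then 1
  else if x = 2 then PySem.Int.mod 2 p
  else pvBOuter list_n p (2 * list_n.length + 2) 1 i

-- ===== PRECONDITION & SPEC =====
-- Pre_ excludes exactly the inputs where A raises: i out of range (IndexError), and p ≤ 1 with
-- list_n[i] ≤ p, ≠ 1 (ZeroDivisionError for p = 0, unbounded recursion → RecursionError otherwise).
def Pre_calc_answer_core (list_n : List Int) (i : Int) (p : Int) : Prop :=
  PySem.Raise.InRange list_n.length i ∧
  (2 ≤ p ∨ pvIdx list_n i > p ∨ pvIdx list_n i = 1)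
instance (list_n : List Int) (i : Int) (p : Int) : Decidable (Pre_calc_answer_core list_n i p) := by unfold Pre_calc_answer_core; infer_instance

def pvWitness_calc_answer_core : List Int × Int × Int := ([3, 4, 5], 0, 7)

def Spec_calc_answer_core (list_n : List Int) (i : Int) (p : Int) (out : Int) : Prop := out = calc_answer_core_alt list_n i p
instance (list_n : List Int) (i : Int) (p : Int) (out : Int) : Decidable (Spec_calc_answer_core list_n i p out) := by unfold Spec_calc_answer_core; infer_instance

-- ===== CLAIM (what is proved, stated in full; the proofs are below) =====
def Claim_equal_calc_answer_core : Prop := ∀ (list_n : List Int) (i : Int) (p : Int), Dom_calc_answer_core list_n i p → Pre_calc_answer_core list_n i p → Spec_calc_answer_core list_n i p (calc_answer_core list_n i p)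

-- ===== LEMMAS AND PROOFS =====

-- B's inner loop computes the same pair as A's inner loop
lemma pvBInner_eq_pvALoop (list_n : List Int) (p res i : Int) :
    pvBInner list_n p res i = pvALoop list_n p res i := by
  fun_induction pvALoop list_n p res i with
  | case1 res i h ih =>
      rw [pvBInner]
      simp only [if_pos h.1, if_neg (by omega : ¬ (list_n.length : Int) ≤ i)]
      exact ih
  | case2 res i h =>
      rw [pvBInner]
      by_cases h1 : res < p
      · simp only [if_pos h1, if_pos (by omega : (list_n.length : Int) ≤ i)]
      · simp only [if_neg h1]

lemma pvALoop_le (list_n : List Int) (p res i : Int) : i ≤ (pvALoop list_n p res i).2 := by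
  fun_induction pvALoop list_n p res i with
  | case1 res i h ih => omega
  | case2 res i h => simp

lemma pvALoop_upper (list_n : List Int) (p res i : Int) (h : i ≤ (list_n.length : Int)) :
    (pvALoop list_n p res i).2 ≤ (list_n.length : Int) := by
  fun_induction pvALoop list_n p res i with
  | case1 res i hc ih => exact ih (by omega)
  | case2 res i hne => simpa using h

lemma pvALoop_progress (list_n : List Int) (p i : Int) (hp : 2 ≤ p)
    (hi : i < (list_n.length : Int)) : i + 1 ≤ (pvALoop list_n p 1 i).2 := by
  rw [pvALoop, dif_pos ⟨by omega, hi⟩]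
  exact pvALoop_le _ _ _ _

lemma mulmod_left (p x y : Int) : (x % p * y) % p = (x * y) % p := by
  rw [Int.mul_emod (x % p) y, Int.emod_emod_of_dvd x dvd_rfl, ← Int.mul_emod]

lemma mulmod_right (p x y : Int) : (x * (y % p)) % p = (x * y) % p := by
  rw [Int.mul_emod x (y % p), Int.emod_emod_of_dvd y dvd_rfl, ← Int.mul_emod]

lemma mulmod_mid (p a b c : Int) : (a * (b % p) * c) % p = (a * b * c) % p := by
  rw [show a * (b % p) * c = a * c * (b % p) by ring, mulmod_right,
    show a * c * b = a * b * c by ring]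

-- Main invariant: on the non-guard path, B's accumulator loop equals acc times A's recursion, mod p
lemma pvKey (list_n : List Int) (p : Int) (hp : 2 ≤ p) :
    ∀ (fuel : Nat) (i acc : Int), i < (list_n.length : Int) →
      ((list_n.length : Int) - i).toNat + 1 ≤ fuel →
      ¬ pvIdx list_n i > p → pvIdx list_n i ≠ 1 → pvIdx list_n i ≠ 2 →
      pvBOuter list_n p fuel acc i = (acc * pvACore list_n p fuel i) % p := by
  intro fuel
  induction fuel with
  | zero => intro i acc hi hf hg h1 h2; omega
  | succ f ih =>
    intro i acc hi hf hg h1 h2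
    have hp0 : (0 : Int) < p := by omega
    rw [pvBOuter, pvACore]
    simp only [if_pos hi, if_neg hg, if_neg h1, if_neg h2, pvBInner_eq_pvALoop,
      PySem.Int.mod_eq_emod_of_pos hp0]
    set s := pvALoop list_n p 1 i with hs
    have hsge : i + 1 ≤ s.2 := pvALoop_progress list_n p i hp hi
    have hsle : s.2 ≤ (list_n.length : Int) := pvALoop_upper list_n p 1 i (by omega)
    by_cases hend : (list_n.length : Int) ≤ s.2
    · simp only [if_pos hend, if_neg (by omega : ¬ s.2 < (list_n.length : Int)), mul_one,
        Int.emod_emod_of_dvd s.1 dvd_rfl, mulmod_right]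
    · obtain ⟨g, rfl⟩ : ∃ g, f = g + 1 := ⟨f - 1, by omega⟩
      simp only [if_neg hend, if_pos (by omega : s.2 < (list_n.length : Int))]
      by_cases hg' : pvIdx list_n s.2 > p
      · rw [pvACore]
        simp only [if_pos hg', mul_zero, Int.zero_emod]
      · by_cases h1' : pvIdx list_n s.2 = 1
        · rw [pvACore]
          simp only [if_neg hg', if_pos h1', mul_one,
            Int.emod_emod_of_dvd s.1 dvd_rfl, mulmod_right]
        · by_cases h2' : pvIdx list_n s.2 = 2
          · conv_rhs => rw [pvACore]
            simp only [if_neg hg', if_neg h1', if_pos h2', PySem.Int.mod_eq_emod_of_pos hp0,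
              mulmod_left, mulmod_right]
            rw [mul_assoc]
          · simp only [if_neg hg', if_neg h1', if_neg h2']
            rw [ih s.2 ((acc * s.1) % p) (by omega) (by omega) hg' h1' h2',
              mulmod_left, mulmod_right, ← mul_assoc, mulmod_mid]

-- ===== VERDICT (by name: the statement is the Claim_ definition above) =====
theorem calc_answer_core_spec : Claim_equal_calc_answer_core := by
  intro list_n i p _ hpre
  obtain ⟨hir, hdisj⟩ := hpre
  have hrange : -(list_n.length : Int) ≤ i ∧ i < (list_n.length : Int) := by
    simpa [PySem.Raise.InRange] using hir
  unfold Spec_calc_answer_core calc_answer_core calc_answer_core_alt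
  have hF : 2 * list_n.length + 2 = (2 * list_n.length + 1) + 1 := rfl
  rw [hF, pvACore]
  by_cases hg : pvIdx list_n i > p
  · simp only [if_pos hg]
  · by_cases h1 : pvIdx list_n i = 1
    · simp only [if_neg hg, if_pos h1]
    · by_cases h2 : pvIdx list_n i = 2
      · simp only [if_neg hg, if_neg h1, if_pos h2]
      · have hp : 2 ≤ p := by
          rcases hdisj with h | h | h
          · exact h
          · exact absurd h hg
          · exact absurd h h1
        have hp0 : (0 : Int) < p := by omega
        have hkey := pvKey list_n p hp ((2 * list_n.length + 1) + 1) i 1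
          hrange.2 (by omega) hg h1 h2
        simp only [if_neg hg, if_neg h1, if_neg h2]
        rw [hkey, one_mul]
        conv_rhs => rw [pvACore]
        simp only [if_neg hg, if_neg h1, if_neg h2, PySem.Int.mod_eq_emod_of_pos hp0]
        exact (Int.emod_emod_of_dvd _ dvd_rfl).symm
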